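-- pv_equiv track=rewrite | github.com/invaderskywalker/data_engineer | src/trmeric_services/provider/quantum/utils.py | map_projects_executed_count
-- ===== SOURCE A (Python) =====
-- def map_projects_executed_count(value: int) -> str:
--     """Map integer value to projects executed count string label."""
--
--     ranges = [
--         ((1, 5), '1 – 5'),
--         ((6, 10), '5+'),
--         ((11, 20), '10+'),
--         ((21, 30), '20+'),
--         ((31, 40), '30+'),
--         ((41, 50), '40+'),
--         ((51, 100), '50+'),
--         ((101,200), '100+'),
--         ((201, float('inf')), '200+')
--     ]
--
--     for (low,high),label in ranges:
--         if low<=value<=high: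
--             return label
--     return ''
-- ===== SOURCE B (Python) =====
-- import bisect
--
-- _BOUNDS = [1, 6, 11, 21, 31, 41, 51, 101, 201]
-- _LABELS = ['1 – 5', '5+', '10+', '20+', '30+', '40+', '50+', '100+', '200+']
--
-- def map_projects_executed_count(value: int) -> str:
--     """Map integer value to projects executed count string label."""
--     idx = bisect.bisect_right(_BOUNDS, value) - 1
--     return _LABELS[idx] if idx >= 0 else ''
-- ===== Notes on version B (the rewrite author's own statement) =====
-- stated objective: idiomatic
-- what changed: Replaces the sequential scan of (low, high) ranges by a binary search (bisect_right) over the sorted lower bounds with a parallel label table; the open-ended last bucket falls out as the final index and values below the first bound give a negative index, hence the empty string.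
import Mathlib
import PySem

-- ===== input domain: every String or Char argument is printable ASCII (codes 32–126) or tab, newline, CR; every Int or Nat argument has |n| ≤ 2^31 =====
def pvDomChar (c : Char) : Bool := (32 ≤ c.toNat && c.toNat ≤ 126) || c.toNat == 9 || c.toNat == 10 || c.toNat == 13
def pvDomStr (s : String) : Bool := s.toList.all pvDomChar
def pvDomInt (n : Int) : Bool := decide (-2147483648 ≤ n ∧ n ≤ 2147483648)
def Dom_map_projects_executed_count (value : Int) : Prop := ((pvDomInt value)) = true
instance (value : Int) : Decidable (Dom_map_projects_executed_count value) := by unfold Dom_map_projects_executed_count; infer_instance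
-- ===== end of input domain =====

-- ===== PORT A =====
-- B changes: one bisect_right over sorted lower bounds + label table instead of scanning ranges (idiomatic).
-- A's loop over the range table; the final high bound float('inf') is modelled as `none`
-- (value <= inf is always true for an Int, so `none` with a vacuous upper check is exact).
def pvALoop (value : Int) : List ((Int × Option Int) × String) → String
  | [] => ""
  | ((low, high), label) :: rest =>
      if decide (low ≤ value) && high.elim true (fun hi => decide (value ≤ hi)) then label
      else pvALoop value rest

def map_projects_executed_count (value : Int) : String :=
  pvALoop value
    [((1, some 5), "1 – 5"), ((6, some 10), "5+"), ((11, some 20), "10+"),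
     ((21, some 30), "20+"), ((31, some 40), "30+"), ((41, some 50), "40+"),
     ((51, some 100), "50+"), ((101, some 200), "100+"), ((201, none), "200+")]

-- ===== PORT B =====
-- Port of Source B. The library call bisect.bisect_right(bounds, value) is ported as the
-- corresponding function on the sorted list: the number of elements ≤ value.
def pvBisectRight (bounds : List Int) (value : Int) : Int :=
  ((bounds.takeWhile (fun b => decide (b ≤ value))).length : Int)

def pvBounds : List Int := [1, 6, 11, 21, 31, 41, 51, 101, 201]
def pvLabels : List String := ["1 – 5", "5+", "10+", "20+", "30+", "40+", "50+", "100+", "200+"]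

def map_projects_executed_count_alt (value : Int) : String :=
  let idx : Int := pvBisectRight pvBounds value - 1
  if 0 ≤ idx then pvLabels.getD idx.toNat "" else ""

-- ===== PRECONDITION & SPEC =====
def Spec_map_projects_executed_count (value : Int) (out : String) : Prop := out = map_projects_executed_count_alt value
instance (value : Int) (out : String) : Decidable (Spec_map_projects_executed_count value out) := by unfold Spec_map_projects_executed_count; infer_instance

-- ===== CLAIM (what is proved, stated in full; the proofs are below) =====
def Claim_equal_map_projects_executed_count : Prop := ∀ (value : Int), Dom_map_projects_executed_count value → Spec_map_projects_executed_count value (map_projects_executed_count value)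

-- ===== LEMMAS AND PROOFS =====

-- ===== VERDICT (by name: the statement is the Claim_ definition above) =====
theorem map_projects_executed_count_spec : Claim_equal_map_projects_executed_count := by
  intro value _
  unfold Spec_map_projects_executed_count map_projects_executed_count map_projects_executed_count_alt
  rcases lt_or_ge value 1 with h0|h0
  · simp [pvALoop, pvBisectRight, pvBounds, pvLabels, List.takeWhile, Option.elim, show ¬((1:Int) ≤ value) from by omega, show ¬((6:Int) ≤ value) from by omega, show ¬((11:Int) ≤ value) from by omega, show ¬((21:Int) ≤ value) from by omega, show ¬((31:Int) ≤ value) from by omega, show ¬((41:Int) ≤ value) from by omega, show ¬((51:Int) ≤ value) from by omega, show ¬((101:Int) ≤ value) from by omega, show ¬((201:Int) ≤ value) from by omega, show value ≤ (5:Int) from by omega, show value ≤ (10:Int) from by omega, show value ≤ (20:Int) from by omega, show value ≤ (30:Int) from by omega, show value ≤ (40:Int) from by omega, show value ≤ (50:Int) from by omega, show value ≤ (100:Int) from by omega, show value ≤ (200:Int) from by omega]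
  rcases lt_or_ge value 6 with h1|h1
  · simp [pvALoop, pvBisectRight, pvBounds, pvLabels, List.takeWhile, Option.elim, show (1:Int) ≤ value from by omega, show ¬((6:Int) ≤ value) from by omega, show ¬((11:Int) ≤ value) from by omega, show ¬((21:Int) ≤ value) from by omega, show ¬((31:Int) ≤ value) from by omega, show ¬((41:Int) ≤ value) from by omega, show ¬((51:Int) ≤ value) from by omega, show ¬((101:Int) ≤ value) from by omega, show ¬((201:Int) ≤ value) from by omega, show value ≤ (5:Int) from by omega, show value ≤ (10:Int) from by omega, show value ≤ (20:Int) from by omega, show value ≤ (30:Int) from by omega, show value ≤ (40:Int) from by omega, show value ≤ (50:Int) from by omega, show value ≤ (100:Int) from by omega, show value ≤ (200:Int) from by omega]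
  rcases lt_or_ge value 11 with h2|h2
  · simp [pvALoop, pvBisectRight, pvBounds, pvLabels, List.takeWhile, Option.elim, show (1:Int) ≤ value from by omega, show (6:Int) ≤ value from by omega, show ¬((11:Int) ≤ value) from by omega, show ¬((21:Int) ≤ value) from by omega, show ¬((31:Int) ≤ value) from by omega, show ¬((41:Int) ≤ value) from by omega, show ¬((51:Int) ≤ value) from by omega, show ¬((101:Int) ≤ value) from by omega, show ¬((201:Int) ≤ value) from by omega, show ¬(value ≤ (5:Int)) from by omega, show value ≤ (10:Int) from by omega, show value ≤ (20:Int) from by omega, show value ≤ (30:Int) from by omega, show value ≤ (40:Int) from by omega, show value ≤ (50:Int) from by omega, show value ≤ (100:Int) from by omega, show value ≤ (200:Int) from by omega]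
  rcases lt_or_ge value 21 with h3|h3
  · simp [pvALoop, pvBisectRight, pvBounds, pvLabels, List.takeWhile, Option.elim, show (1:Int) ≤ value from by omega, show (6:Int) ≤ value from by omega, show (11:Int) ≤ value from by omega, show ¬((21:Int) ≤ value) from by omega, show ¬((31:Int) ≤ value) from by omega, show ¬((41:Int) ≤ value) from by omega, show ¬((51:Int) ≤ value) from by omega, show ¬((101:Int) ≤ value) from by omega, show ¬((201:Int) ≤ value) from by omega, show ¬(value ≤ (5:Int)) from by omega, show ¬(value ≤ (10:Int)) from by omega, show value ≤ (20:Int) from by omega, show value ≤ (30:Int) from by omega, show value ≤ (40:Int) from by omega, show value ≤ (50:Int) from by omega, show value ≤ (100:Int) from by omega, show value ≤ (200:Int) from by omega]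
  rcases lt_or_ge value 31 with h4|h4
  · simp [pvALoop, pvBisectRight, pvBounds, pvLabels, List.takeWhile, Option.elim, show (1:Int) ≤ value from by omega, show (6:Int) ≤ value from by omega, show (11:Int) ≤ value from by omega, show (21:Int) ≤ value from by omega, show ¬((31:Int) ≤ value) from by omega, show ¬((41:Int) ≤ value) from by omega, show ¬((51:Int) ≤ value) from by omega, show ¬((101:Int) ≤ value) from by omega, show ¬((201:Int) ≤ value) from by omega, show ¬(value ≤ (5:Int)) from by omega, show ¬(value ≤ (10:Int)) from by omega, show ¬(value ≤ (20:Int)) from by omega, show value ≤ (30:Int) from by omega, show value ≤ (40:Int) from by omega, show value ≤ (50:Int) from by omega, show value ≤ (100:Int) from by omega, show value ≤ (200:Int) from by omega]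
  rcases lt_or_ge value 41 with h5|h5
  · simp [pvALoop, pvBisectRight, pvBounds, pvLabels, List.takeWhile, Option.elim, show (1:Int) ≤ value from by omega, show (6:Int) ≤ value from by omega, show (11:Int) ≤ value from by omega, show (21:Int) ≤ value from by omega, show (31:Int) ≤ value from by omega, show ¬((41:Int) ≤ value) from by omega, show ¬((51:Int) ≤ value) from by omega, show ¬((101:Int) ≤ value) from by omega, show ¬((201:Int) ≤ value) from by omega, show ¬(value ≤ (5:Int)) from by omega, show ¬(value ≤ (10:Int)) from by omega, show ¬(value ≤ (20:Int)) from by omega, show ¬(value ≤ (30:Int)) from by omega, show value ≤ (40:Int) from by omega, show value ≤ (50:Int) from by omega, show value ≤ (100:Int) from by omega, show value ≤ (200:Int) from by omega]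
  rcases lt_or_ge value 51 with h6|h6
  · simp [pvALoop, pvBisectRight, pvBounds, pvLabels, List.takeWhile, Option.elim, show (1:Int) ≤ value from by omega, show (6:Int) ≤ value from by omega, show (11:Int) ≤ value from by omega, show (21:Int) ≤ value from by omega, show (31:Int) ≤ value from by omega, show (41:Int) ≤ value from by omega, show ¬((51:Int) ≤ value) from by omega, show ¬((101:Int) ≤ value) from by omega, show ¬((201:Int) ≤ value) from by omega, show ¬(value ≤ (5:Int)) from by omega, show ¬(value ≤ (10:Int)) from by omega, show ¬(value ≤ (20:Int)) from by omega, show ¬(value ≤ (30:Int)) from by omega, show ¬(value ≤ (40:Int)) from by omega, show value ≤ (50:Int) from by omega, show value ≤ (100:Int) from by omega, show value ≤ (200:Int) from by omega]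
  rcases lt_or_ge value 101 with h7|h7
  · simp [pvALoop, pvBisectRight, pvBounds, pvLabels, List.takeWhile, Option.elim, show (1:Int) ≤ value from by omega, show (6:Int) ≤ value from by omega, show (11:Int) ≤ value from by omega, show (21:Int) ≤ value from by omega, show (31:Int) ≤ value from by omega, show (41:Int) ≤ value from by omega, show (51:Int) ≤ value from by omega, show ¬((101:Int) ≤ value) from by omega, show ¬((201:Int) ≤ value) from by omega, show ¬(value ≤ (5:Int)) from by omega, show ¬(value ≤ (10:Int)) from by omega, show ¬(value ≤ (20:Int)) from by omega, show ¬(value ≤ (30:Int)) from by omega, show ¬(value ≤ (40:Int)) from by omega, show ¬(value ≤ (50:Int)) from by omega, show value ≤ (100:Int) from by omega, show value ≤ (200:Int) from by omega]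
  rcases lt_or_ge value 201 with h8|h8
  · simp [pvALoop, pvBisectRight, pvBounds, pvLabels, List.takeWhile, Option.elim, show (1:Int) ≤ value from by omega, show (6:Int) ≤ value from by omega, show (11:Int) ≤ value from by omega, show (21:Int) ≤ value from by omega, show (31:Int) ≤ value from by omega, show (41:Int) ≤ value from by omega, show (51:Int) ≤ value from by omega, show (101:Int) ≤ value from by omega, show ¬((201:Int) ≤ value) from by omega, show ¬(value ≤ (5:Int)) from by omega, show ¬(value ≤ (10:Int)) from by omega, show ¬(value ≤ (20:Int)) from by omega, show ¬(value ≤ (30:Int)) from by omega, show ¬(value ≤ (40:Int)) from by omega, show ¬(value ≤ (50:Int)) from by omega, show ¬(value ≤ (100:Int)) from by omega, show value ≤ (200:Int) from by omega]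
  · simp [pvALoop, pvBisectRight, pvBounds, pvLabels, List.takeWhile, Option.elim, show (1:Int) ≤ value from by omega, show (6:Int) ≤ value from by omega, show (11:Int) ≤ value from by omega, show (21:Int) ≤ value from by omega, show (31:Int) ≤ value from by omega, show (41:Int) ≤ value from by omega, show (51:Int) ≤ value from by omega, show (101:Int) ≤ value from by omega, show (201:Int) ≤ value from by omega, show ¬(value ≤ (5:Int)) from by omega, show ¬(value ≤ (10:Int)) from by omega, show ¬(value ≤ (20:Int)) from by omega, show ¬(value ≤ (30:Int)) from by omega, show ¬(value ≤ (40:Int)) from by omega, show ¬(value ≤ (50:Int)) from by omega, show ¬(value ≤ (100:Int)) from by omega, show ¬(value ≤ (200:Int)) from by omega]
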